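-- pv_equiv track=rewrite | github.com/dumindu2041329/pdf-tools | lib/pdf/pdf_to_xlsx.py | detect_row_merges
-- ===== SOURCE A (Python) =====
-- def detect_row_merges(row):
--     """
--     Return list of (start_col_0indexed, span) for cells that should be
--     merged horizontally.
--     A cell should be merged when it is non-empty and is followed by
--     one or more None / empty-string cells.
--     """
--     merges = []
--     i = 0
--     while i < len(row):
--         val = row[i]
--         if val not in (None, ""):
--             span = 1
--             while i + span < len(row) and row[i + span] in (None, ""):
--                 span += 1
--             if span > 1:
--                 merges.append((i, span))
--             i += span
--         else:
--             i += 1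
--     return merges
-- ===== SOURCE B (Python) =====
-- def detect_row_merges(row):
--     anchors = [i for i, v in enumerate(row) if v not in (None, "")]
--     merges = []
--     for idx, a in enumerate(anchors):
--         boundary = anchors[idx + 1] if idx + 1 < len(anchors) else len(row)
--         span = boundary - a
--         if span > 1:
--             merges.append((a, span))
--     return merges
-- ===== Notes on version B (the rewrite author's own statement) =====
-- stated objective: simpler
-- what changed: Replaces A's nested while loops (outer index walk plus inner empty-counting scan) by a single anchors list of non-empty indices and one pass over consecutive anchors, computing each span as next-anchor (or len(row)) minus anchor.
import Mathlib
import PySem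

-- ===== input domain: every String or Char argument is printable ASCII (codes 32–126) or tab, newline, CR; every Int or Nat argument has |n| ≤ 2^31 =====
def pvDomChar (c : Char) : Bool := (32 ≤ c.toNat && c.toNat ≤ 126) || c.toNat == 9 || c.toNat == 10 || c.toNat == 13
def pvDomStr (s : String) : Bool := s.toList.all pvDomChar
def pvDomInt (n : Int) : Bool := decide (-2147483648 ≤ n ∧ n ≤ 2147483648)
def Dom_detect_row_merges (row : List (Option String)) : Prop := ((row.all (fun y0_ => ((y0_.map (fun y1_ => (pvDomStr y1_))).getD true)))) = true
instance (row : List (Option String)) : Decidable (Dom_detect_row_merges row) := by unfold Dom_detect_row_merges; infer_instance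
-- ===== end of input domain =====

-- B replaces A's nested while loops by an anchors list of non-empty indices and one
-- pass over consecutive anchors (span = next anchor, or len(row), minus anchor): simpler decomposition.


-- ===== PORT A =====
-- `v not in (None, "")` test, shared by both ports
def pvEmptyCell (v : Option String) : Bool := v == none || v == some ""

-- inner while: count of leading empty cells (row[i+span] in (None,"") scan)
def pvCountEmpties : List (Option String) → Nat
  | [] => 0
  | v :: rest => if pvEmptyCell v then pvCountEmpties rest + 1 else 0

-- outer while loop of A; the suffix of row at index i drives the recursion, i advances by span
def pvLoopA : List (Option String) → Int → List (Int × Int)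
  | [], _ => []
  | v :: rest, i =>
    if pvEmptyCell v then pvLoopA rest (i + 1)
    else
      let k := pvCountEmpties rest
      let span : Int := 1 + (k : Int)
      (if span > 1 then [(i, span)] else []) ++ pvLoopA (rest.drop k) (i + span)
termination_by xs _ => xs.length
decreasing_by all_goals (simp [List.length_drop]; try omega)

def detect_row_merges (row : List (Option String)) : List (Int × Int) := pvLoopA row 0

-- ===== PORT B =====
-- the comprehension [i for i, v in enumerate(row) if v not in (None, "")]
def pvAnchors : List (Option String) → Int → List Int
  | [], _ => []
  | v :: rest, i => if pvEmptyCell v then pvAnchors rest (i + 1) else i :: pvAnchors rest (i + 1)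

-- the for loop over anchors: boundary = next anchor or len(row)
def pvMergeLoop (n : Int) : List Int → List (Int × Int)
  | [] => []
  | [a] => if n - a > 1 then [(a, n - a)] else []
  | a :: b :: rest => (if b - a > 1 then [(a, b - a)] else []) ++ pvMergeLoop n (b :: rest)

def detect_row_merges_alt (row : List (Option String)) : List (Int × Int) :=
  pvMergeLoop (row.length : Int) (pvAnchors row 0)

-- ===== PRECONDITION & SPEC =====
def Spec_detect_row_merges (row : List (Option String)) (out : List (Int × Int)) : Prop := out = detect_row_merges_alt row
instance (row : List (Option String)) (out : List (Int × Int)) : Decidable (Spec_detect_row_merges row out) := by unfold Spec_detect_row_merges; infer_instance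

-- ===== CLAIM (what is proved, stated in full; the proofs are below) =====
def Claim_equal_detect_row_merges : Prop := ∀ (row : List (Option String)), Dom_detect_row_merges row → Spec_detect_row_merges row (detect_row_merges row)

-- ===== LEMMAS AND PROOFS =====

theorem pvCountEmpties_le (xs : List (Option String)) : pvCountEmpties xs ≤ xs.length := by
  induction xs with
  | nil => simp [pvCountEmpties]
  | cons v rest ih => simp only [pvCountEmpties, List.length_cons]; split <;> omega


-- skipping the counted empties does not change the anchors (only the base offset)
theorem pvAnchors_drop (xs : List (Option String)) (j : Int) :
    pvAnchors xs j = pvAnchors (xs.drop (pvCountEmpties xs)) (j + (pvCountEmpties xs : Int)) := by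
  induction xs generalizing j with
  | nil => simp [pvAnchors, pvCountEmpties]
  | cons v rest ih =>
    by_cases h : pvEmptyCell v = true
    · simp only [pvAnchors, pvCountEmpties, h, if_pos]
      rw [ih (j + 1)]
      congr 1
      push_cast
      ring
    · simp [pvAnchors, pvCountEmpties, h]

-- the suffix after the counted empties is empty or starts with a non-empty cell
theorem pvDrop_countEmpties (xs : List (Option String)) :
    xs.drop (pvCountEmpties xs) = [] ∨
    ∃ w ws, xs.drop (pvCountEmpties xs) = w :: ws ∧ pvEmptyCell w = false := by
  induction xs with
  | nil => left; simp
  | cons v rest ih =>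
    by_cases h : pvEmptyCell v = true
    · simpa [pvCountEmpties, h] using ih
    · right; exact ⟨v, rest, by simp [pvCountEmpties, h], by simpa using h⟩

-- main invariant: A's loop from offset i equals B's merge pass over the anchors from offset i,
-- with boundary i + length
theorem pvLoop_eq (n : Nat) : ∀ (xs : List (Option String)) (i : Int), xs.length ≤ n →
    pvLoopA xs i = pvMergeLoop (i + (xs.length : Int)) (pvAnchors xs i) := by
  induction n with
  | zero =>
    intro xs i h
    have : xs = [] := List.length_eq_zero_iff.mp (Nat.le_zero.mp h)
    subst this; simp [pvLoopA, pvAnchors, pvMergeLoop]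
  | succ m ih =>
    intro xs i h
    match xs with
    | [] => simp [pvLoopA, pvAnchors, pvMergeLoop]
    | v :: rest =>
      by_cases hv : pvEmptyCell v = true
      · rw [show pvLoopA (v :: rest) i = pvLoopA rest (i + 1) by rw [pvLoopA]; simp [hv]]
        rw [ih rest (i + 1) (by simpa using Nat.lt_succ_iff.mp (by simpa using h))]
        simp only [pvAnchors, hv, if_pos, List.length_cons]
        congr 1
        push_cast; ring
      · have hrest : rest.length ≤ m := by simpa using Nat.lt_succ_iff.mp (by simpa using h)
        set k := pvCountEmpties rest with hk
        have hkle : k ≤ rest.length := pvCountEmpties_le rest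
        rw [show pvLoopA (v :: rest) i =
            (if (1 + (k : Int)) > 1 then [(i, 1 + (k : Int))] else []) ++
              pvLoopA (rest.drop k) (i + (1 + (k : Int))) by rw [pvLoopA]; simp [hv, hk]]
        have hanch : pvAnchors (v :: rest) i =
            i :: pvAnchors (rest.drop k) (i + 1 + (k : Int)) := by
          simp only [pvAnchors, hv, Bool.false_eq_true, if_false]
          rw [pvAnchors_drop rest (i + 1), hk]
        rw [hanch]
        have hdroplen : ((rest.drop k).length : Int) = (rest.length : Int) - (k : Int) := by
          rw [List.length_drop]; omega
        have hld : (List.drop k rest).length = rest.length - k := List.length_drop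
        rcases pvDrop_countEmpties rest with hnil | ⟨w, ws, heq, hw⟩
        · rw [← hk] at hnil
          have hkeq : k = rest.length := by rw [hnil] at hld; simp at hld; omega
          rw [hnil]
          simp only [pvAnchors, pvMergeLoop, pvLoopA, List.append_nil]
          have hspan : i + ((v :: rest).length : Int) - i = 1 + (k : Int) := by
            have hl : ((v :: rest).length : Int) = 1 + (k : Int) := by
              rw [List.length_cons]; push_cast [hkeq]; ring
            omega
          rw [hspan]
        · rw [← hk] at heq
          rw [heq]
          simp only [pvAnchors, hw, Bool.false_eq_true, if_false]
          rw [pvMergeLoop]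
          have hb : i + 1 + (k : Int) - i = 1 + (k : Int) := by ring
          rw [hb]
          congr 1
          have hwslen : ws.length + 1 = rest.length - k := by
            rw [heq] at hld; simpa using hld
          have hIH := ih (w :: ws) (i + (1 + (k : Int))) (by simp; omega)
          rw [hIH]
          simp only [pvAnchors, hw, Bool.false_eq_true, if_false]
          have e1 : i + (1 + (k : Int)) = i + 1 + (k : Int) := by ring
          rw [e1]
          congr 1
          simp only [List.length_cons]
          push_cast
          omega

-- ===== VERDICT (by name: the statement is the Claim_ definition above) =====
theorem detect_row_merges_spec : Claim_equal_detect_row_merges := by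
  intro row _
  unfold Spec_detect_row_merges detect_row_merges detect_row_merges_alt
  simpa using pvLoop_eq row.length row 0 le_rfl
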